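-- pv_equiv track=rewrite | github.com/chmarti1/eikosi | eikosi.py | _initial
-- ===== SOURCE A (Python) =====
-- def _initial(part):
--     """Helper function to construct an initial from a name part"""
--     escape = False
--     for char in part:
--         # If this character is escaped, ignore it
--         if escape:
--             escape = False
--         elif char == '\\':
--             escape = True
--         elif char.isalpha():
--             return char.upper()
--     raise Exception('AuthorList._initial: Failed to find a valid alpha character from: ' + part + '\n')
-- ===== SOURCE B (Python) =====
-- def _initial(part):
--     # Pass 1: delete every escaped pair (backslash + following char) by index jumps.
--     cleaned = []
--     i = 0
--     n = len(part)
--     while i < n: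
--         if part[i] == '\\':
--             i += 2
--         else:
--             cleaned.append(part[i])
--             i += 1
--     # Pass 2: first alphabetic character of the cleaned text, uppercased.
--     for ch in cleaned:
--         if ch.isalpha():
--             return ch.upper()
--     raise Exception('AuthorList._initial: Failed to find a valid alpha character from: ' + part + '\n')
-- ===== Notes on version B (the rewrite author's own statement) =====
-- stated objective: alternative
-- what changed: Replaces the single stateful escape-flag scan with a two-pass decomposition: an index loop that deletes each backslash-escaped pair by jumping two positions, then a separate scan of the cleaned characters for the first alpha.
-- outside the precondition, e.g. on _initial('123'): A raises Exception, B raises Exception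
import Mathlib
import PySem

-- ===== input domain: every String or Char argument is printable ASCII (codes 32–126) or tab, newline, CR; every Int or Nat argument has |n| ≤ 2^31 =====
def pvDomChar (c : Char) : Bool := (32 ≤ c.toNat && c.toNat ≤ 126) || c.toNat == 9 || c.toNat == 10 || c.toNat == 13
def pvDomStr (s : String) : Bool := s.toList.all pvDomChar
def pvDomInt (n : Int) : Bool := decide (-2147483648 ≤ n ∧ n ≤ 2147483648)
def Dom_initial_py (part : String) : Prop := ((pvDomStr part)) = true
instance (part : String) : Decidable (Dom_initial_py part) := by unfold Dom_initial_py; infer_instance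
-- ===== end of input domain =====

-- B replaces A's single stateful escape-flag scan with a two-pass decomposition
-- (first delete escaped pairs, then scan the cleaned text for the first alpha); same cost.


-- ===== PORT A =====
-- A's loop: escape flag threaded through a single scan; `none` = the Python raises.
def initialALoop : List Char → Bool → Option String
  | [], _ => none
  | c :: rest, escape =>
    if escape then initialALoop rest false
    else if c = '\\' then initialALoop rest true
    else if PySem.Chars.isalpha c then some (String.ofList [PySem.Chars.upperChar c])
    else initialALoop rest false

def initial_py (part : String) : String :=
  match initialALoop part.toList false with
  | some r => r
  | none => ""   -- the Python raises here; excluded by Pre_initial_py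

-- ===== PORT B =====
-- Source B pass 1: drop each backslash together with the character after it.
def stripEscaped : List Char → List Char
  | [] => []
  | c :: rest => if c = '\\' then stripEscaped (rest.drop 1) else c :: stripEscaped rest
  termination_by l => l.length
  decreasing_by all_goals simp

-- Source B pass 2: first alphabetic character, uppercased.
def firstAlpha : List Char → Option String
  | [] => none
  | c :: rest =>
    if PySem.Chars.isalpha c then some (String.ofList [PySem.Chars.upperChar c])
    else firstAlpha rest

def initial_py_alt (part : String) : String :=
  match firstAlpha (stripEscaped part.toList) with
  | some r => r
  | none => ""   -- the Python raises here; excluded by Pre_initial_py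

-- ===== PRECONDITION & SPEC =====
-- Pre_ excludes exactly the inputs on which the Python A raises its Exception:
-- it holds iff some position i holds an alphabetic character that is not escaped,
-- i.e. the run of consecutive backslashes immediately before position i has even length.
def backslashRunBefore (l : List Char) (i : Nat) : Nat :=
  ((l.take i).reverse.takeWhile (fun c => c = '\\')).length

def Pre_initial_py (part : String) : Prop :=
  ∃ i < part.toList.length,
    PySem.Chars.isalpha (part.toList.getD i ' ') = true ∧
    backslashRunBefore part.toList i % 2 = 0
instance (part : String) : Decidable (Pre_initial_py part) := by
  unfold Pre_initial_py; infer_instance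

def pvWitness_initial_py : String := "van Gogh"


def Spec_initial_py (part : String) (out : String) : Prop := out = initial_py_alt part
instance (part : String) (out : String) : Decidable (Spec_initial_py part out) := by
  unfold Spec_initial_py; infer_instance

-- ===== CLAIM (what is proved, stated in full; the proofs are below) =====
def Claim_equal_initial_py : Prop :=
  ∀ (part : String), Dom_initial_py part → Pre_initial_py part →
    Spec_initial_py part (initial_py part)

-- ===== LEMMAS AND PROOFS =====
-- The escape-flag scan equals the strip-then-scan composition (on every input).
theorem initialALoop_eq (l : List Char) :
    initialALoop l false = firstAlpha (stripEscaped l) := by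
  induction l using stripEscaped.induct with
  | case1 => simp [initialALoop, stripEscaped, firstAlpha]
  | case2 rest ih =>
    cases rest with
    | nil => simp [initialALoop, stripEscaped, firstAlpha]
    | cons d r =>
      simp only [initialALoop, if_neg (Bool.false_ne_true), if_true]
      simpa [stripEscaped, initialALoop] using ih
  | case3 c rest hc ih =>
    by_cases ha : PySem.Chars.isalpha c
    · simp [initialALoop, stripEscaped, firstAlpha, hc, ha]
    · simp [initialALoop, stripEscaped, firstAlpha, hc, ha, ih]

-- ===== VERDICT (by name: the statement is the Claim_ definition above) =====
theorem initial_py_spec : Claim_equal_initial_py := by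
  intro part _ _
  unfold Spec_initial_py initial_py initial_py_alt
  rw [initialALoop_eq]
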